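-- pv_equiv track=rewrite | github.com/KaletaMan/BO-Planer-Podrozniczy | initial_population.py | _direct_simple_path
-- ===== SOURCE A (Python) =====
-- def _direct_simple_path(start, end):
--     """Deterministyczna prosta ścieżka.
--
--     Zawsze działa na pustej siatce (bez przeszkód), bo każdy krok przybliża do celu.
--     """
--     r, c = start
--     end_r, end_c = end
--     path = [(r, c)]
--
--     while (r, c) != (end_r, end_c):
--         dr = 0
--         dc = 0
--
--         if r < end_r:
--             dr = 1
--         elif r > end_r:
--             dr = -1
--
--         if c < end_c:
--             dc = 1
--         elif c > end_c:
--             dc = -1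
--
--         r += dr
--         c += dc
--         path.append((r, c))
--
--     return path
-- ===== SOURCE B (Python) =====
-- def _direct_simple_path(start, end):
--     """Deterministyczna prosta sciezka: closed-form comprehension instead of a stepping loop."""
--     r, c = start
--     er, ec = end
--     ar = abs(er - r)
--     ac = abs(ec - c)
--     sr = (er > r) - (er < r)
--     sc = (ec > c) - (ec < c)
--     n = max(ar, ac)
--     return [(r + sr * min(i, ar), c + sc * min(i, ac)) for i in range(n + 1)]
-- ===== Notes on version B (the rewrite author's own statement) =====
-- stated objective: simpler
-- what changed: Replaced the incremental sign-stepping while-loop state machine with a closed-form comprehension: each point i is computed directly as (r + sr*min(i,|dr|), c + sc*min(i,|dc|)) for i in range(max(|dr|,|dc|)+1).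
import Mathlib
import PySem

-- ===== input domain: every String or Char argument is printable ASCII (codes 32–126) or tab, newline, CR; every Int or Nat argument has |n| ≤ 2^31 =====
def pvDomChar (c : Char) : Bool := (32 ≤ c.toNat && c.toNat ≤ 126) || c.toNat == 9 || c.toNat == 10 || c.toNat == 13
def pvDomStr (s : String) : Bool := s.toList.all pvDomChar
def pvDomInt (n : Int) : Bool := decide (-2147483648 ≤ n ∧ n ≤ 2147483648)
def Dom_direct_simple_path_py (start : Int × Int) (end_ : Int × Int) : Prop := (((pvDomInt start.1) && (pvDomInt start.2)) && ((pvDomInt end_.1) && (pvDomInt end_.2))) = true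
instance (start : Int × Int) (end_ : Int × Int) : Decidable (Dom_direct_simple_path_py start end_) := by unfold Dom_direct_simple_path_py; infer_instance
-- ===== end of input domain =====

-- B replaces A's incremental sign-stepping while-loop with a closed-form comprehension
-- computing each path point directly from its index (objective: simpler).

-- ===== PORT A =====
-- the while loop of A, carrying the accumulated path and the current (r, c);
-- fuel is only a structural-termination bound (|er-r| + |ec-c| + 1 always suffices)
def pvLoopA : Nat → Int → Int → List (Int × Int) → Int → Int → List (Int × Int)
  | 0, _, _, acc, _, _ => acc
  | fuel + 1, er, ec, acc, r, c =>
    if (r, c) = (er, ec) then acc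
    else
      let dr : Int := if r < er then 1 else if r > er then -1 else 0
      let dc : Int := if c < ec then 1 else if c > ec then -1 else 0
      pvLoopA fuel er ec (acc ++ [(r + dr, c + dc)]) (r + dr) (c + dc)

def direct_simple_path_py (start : Int × Int) (end_ : Int × Int) : List (Int × Int) :=
  pvLoopA ((end_.1 - start.1).natAbs + (end_.2 - start.2).natAbs + 1)
    end_.1 end_.2 [(start.1, start.2)] start.1 start.2

-- ===== PORT B =====
def direct_simple_path_py_alt (start : Int × Int) (end_ : Int × Int) : List (Int × Int) :=
  let r := start.1
  let c := start.2
  let er := end_.1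
  let ec := end_.2
  let ar : Int := ((er - r).natAbs : Int)
  let ac : Int := ((ec - c).natAbs : Int)
  let sr : Int := (if er > r then 1 else 0) - (if er < r then 1 else 0)
  let sc : Int := (if ec > c then 1 else 0) - (if ec < c then 1 else 0)
  let n : Int := max ar ac
  (PySem.List.pyRange 0 (n + 1) 1).map
    (fun i => (r + sr * min i ar, c + sc * min i ac))

-- ===== PRECONDITION & SPEC =====
def Spec_direct_simple_path_py (start : Int × Int) (end_ : Int × Int) (out : List (Int × Int)) : Prop := out = direct_simple_path_py_alt start end_
instance (start : Int × Int) (end_ : Int × Int) (out : List (Int × Int)) : Decidable (Spec_direct_simple_path_py start end_ out) := by unfold Spec_direct_simple_path_py; infer_instance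

-- ===== CLAIM (what is proved, stated in full; the proofs are below) =====
def Claim_equal_direct_simple_path_py : Prop := ∀ (start : Int × Int) (end_ : Int × Int), Dom_direct_simple_path_py start end_ → Spec_direct_simple_path_py start end_ (direct_simple_path_py start end_)

-- ===== LEMMAS AND PROOFS =====

-- B's per-axis closed form
def pvAxis (r er i : Int) : Int :=
  r + ((if er > r then 1 else 0) - (if er < r then 1 else 0)) * min i ((er - r).natAbs : Int)

-- A's per-axis step
def pvStep (r er : Int) : Int := if r < er then 1 else if r > er then -1 else 0

theorem pvAxis_zero (r er : Int) : pvAxis r er 0 = r := by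
  unfold pvAxis
  split_ifs <;> omega

theorem pvAxis_shift (r er i : Int) (hi : 0 ≤ i) :
    pvAxis r er (i + 1) = pvAxis (r + pvStep r er) er i := by
  unfold pvAxis pvStep
  split_ifs <;> omega

theorem pvStep_measure (r c er ec : Int) (m : ℕ)
    (hne : ¬((r, c) = (er, ec)))
    (hm : max (er - r).natAbs (ec - c).natAbs = m + 1) :
    max (er - (r + pvStep r er)).natAbs (ec - (c + pvStep c ec)).natAbs = m := by
  simp only [Prod.mk.injEq, not_and] at hne
  unfold pvStep
  split_ifs <;> omega

theorem pvLoopA_closed : ∀ (m fuel : ℕ) (r c er ec : Int) (acc : List (Int × Int)),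
    max (er - r).natAbs (ec - c).natAbs = m → m < fuel →
    pvLoopA fuel er ec acc r c =
      acc ++ (List.range m).map (fun (j : ℕ) => (pvAxis r er ((j : Int) + 1), pvAxis c ec ((j : Int) + 1))) := by
  intro m
  induction m with
  | zero =>
    intro fuel r c er ec acc hm hf
    obtain ⟨f, rfl⟩ : ∃ f, fuel = f + 1 := ⟨fuel - 1, by omega⟩
    have hr : r = er := by omega
    have hc : c = ec := by omega
    rw [pvLoopA]
    simp [hr, hc]
  | succ m ih =>
    intro fuel r c er ec acc hm hf
    obtain ⟨f, rfl⟩ : ∃ f, fuel = f + 1 := ⟨fuel - 1, by omega⟩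
    have hne : ¬((r, c) = (er, ec)) := by
      simp only [Prod.mk.injEq, not_and]
      intro h1 h2
      omega
    rw [pvLoopA, if_neg hne]
    have hstep : (if r < er then (1 : Int) else if r > er then -1 else 0) = pvStep r er := rfl
    have hstepc : (if c < ec then (1 : Int) else if c > ec then -1 else 0) = pvStep c ec := rfl
    simp only [hstep, hstepc]
    rw [ih f (r + pvStep r er) (c + pvStep c ec) er ec _ (pvStep_measure r c er ec m hne hm) (by omega)]
    rw [List.range_succ_eq_map, List.map_cons, List.map_map, List.append_assoc]
    congr 1
    simp only [List.cons_append, List.nil_append]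
    congr 1
    · rw [show ((0 : ℕ) : Int) + 1 = 0 + 1 by norm_num,
        pvAxis_shift r er 0 le_rfl, pvAxis_shift c ec 0 le_rfl, pvAxis_zero, pvAxis_zero]
    · apply List.map_congr_left
      intro j _
      simp only [Function.comp_apply]
      have hj : ((j + 1 : ℕ) : Int) + 1 = ((j : Int) + 1) + 1 := by push_cast; ring
      rw [hj, pvAxis_shift r er _ (by positivity), pvAxis_shift c ec _ (by positivity)]

theorem pvAlt_closed (r c er ec : Int) :
    direct_simple_path_py_alt (r, c) (er, ec) =
      (List.range (max (er - r).natAbs (ec - c).natAbs + 1)).map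
        (fun (j : ℕ) => (pvAxis r er (j : Int), pvAxis c ec (j : Int))) := by
  unfold direct_simple_path_py_alt
  simp only
  have hmax : (max ((er - r).natAbs : Int) ((ec - c).natAbs : Int)) =
      ((max (er - r).natAbs (ec - c).natAbs : ℕ) : Int) := by push_cast; rfl
  rw [hmax, PySem.List.pyRange_one]
  have hlen : (((max (er - r).natAbs (ec - c).natAbs : ℕ) : Int) + 1 - 0).toNat =
      max (er - r).natAbs (ec - c).natAbs + 1 := by omega
  rw [hlen, List.map_map]
  apply List.map_congr_left
  intro j _
  simp only [Function.comp_apply]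
  unfold pvAxis
  norm_num

-- ===== VERDICT (by name: the statement is the Claim_ definition above) =====
theorem direct_simple_path_py_spec : Claim_equal_direct_simple_path_py := by
  intro start end_ _
  obtain ⟨r, c⟩ := start
  obtain ⟨er, ec⟩ := end_
  show direct_simple_path_py (r, c) (er, ec) = direct_simple_path_py_alt (r, c) (er, ec)
  rw [pvAlt_closed]
  unfold direct_simple_path_py
  rw [pvLoopA_closed (max (er - r).natAbs (ec - c).natAbs) _ r c er ec _ rfl (by omega)]
  rw [List.range_succ_eq_map, List.map_cons, List.map_map]
  simp only [List.cons_append, List.nil_append, Nat.cast_zero, pvAxis_zero]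
  congr 1
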